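-- pv_equiv track=rewrite | github.com/eronekogin/leetcode | 2024/find_all_good_indices.py | good_indices
-- ===== SOURCE A (Python) =====
-- def good_indices(nums: list[int], k: int) -> list[int]:
--     """
--     good indices
--     """
--     n = len(nums)
--
--     lefts, rights = [1] * (n + 1), [1] * (n + 1)
--
--     for i in range(1, n):
--         if nums[i - 1] >= nums[i]:
--             lefts[i] = lefts[i - 1] + 1
--
--     for i in range(n - 2, -1, -1):
--         if nums[i] <= nums[i + 1]:
--             rights[i] = rights[i + 1] + 1
--
--     return [
--         i
--         for i in range(k, n - k)
--         if lefts[i - 1] >= k and rights[i + 1] >= k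
--     ]
-- ===== SOURCE B (Python) =====
-- def good_indices(nums: list[int], k: int) -> list[int]:
--     """
--     good indices
--     """
--     n = len(nums)
--     return [
--         i
--         for i in range(k, n - k)
--         if all(nums[j] >= nums[j + 1] for j in range(i - k, i - 1))
--         and all(nums[j] <= nums[j + 1] for j in range(i + 1, i + k))
--     ]
-- ===== Notes on version B (the rewrite author's own statement) =====
-- stated objective: simpler
-- what changed: Replaced the two precomputed run-length prefix arrays (lefts/rights) and their index-table lookups by a single list comprehension that directly verifies, for each candidate i, that the k-element window before i is non-increasing and the k-element window after i is non-decreasing via all() over adjacent pairs.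
import Mathlib
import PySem

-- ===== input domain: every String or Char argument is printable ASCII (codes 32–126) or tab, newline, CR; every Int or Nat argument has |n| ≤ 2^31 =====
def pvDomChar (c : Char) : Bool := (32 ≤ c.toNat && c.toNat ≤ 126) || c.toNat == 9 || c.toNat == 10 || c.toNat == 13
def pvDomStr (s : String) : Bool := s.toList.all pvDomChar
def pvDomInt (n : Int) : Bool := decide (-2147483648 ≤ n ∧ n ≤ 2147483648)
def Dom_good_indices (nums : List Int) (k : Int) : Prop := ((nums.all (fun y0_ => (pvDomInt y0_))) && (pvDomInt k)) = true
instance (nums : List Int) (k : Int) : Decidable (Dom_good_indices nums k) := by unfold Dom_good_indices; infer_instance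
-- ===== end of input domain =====

-- B replaces A's two precomputed run-length tables by a direct per-index window check
-- (objective: simpler — a single comprehension, no auxiliary arrays).

-- ===== PORT A =====
def good_indices (nums : List Int) (k : Int) : List Int :=
  let n : Int := (nums.length : Int)
  let lefts : List Int := List.replicate (n.toNat + 1) 1
  let rights : List Int := List.replicate (n.toNat + 1) 1
  let lefts := (PySem.List.pyRange 1 n 1).foldl (fun l i =>
    if PySem.List.pyGetD nums (i - 1) 0 ≥ PySem.List.pyGetD nums i 0 then
      PySem.List.pySetD l i (PySem.List.pyGetD l (i - 1) 0 + 1)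
    else l) lefts
  let rights := (PySem.List.pyRange (n - 2) (-1) (-1)).foldl (fun r i =>
    if PySem.List.pyGetD nums i 0 ≤ PySem.List.pyGetD nums (i + 1) 0 then
      PySem.List.pySetD r i (PySem.List.pyGetD r (i + 1) 0 + 1)
    else r) rights
  (PySem.List.pyRange k (n - k) 1).filter (fun i =>
    decide (PySem.List.pyGetD lefts (i - 1) 0 ≥ k) &&
    decide (PySem.List.pyGetD rights (i + 1) 0 ≥ k))

-- ===== PORT B =====
def good_indices_alt (nums : List Int) (k : Int) : List Int :=
  let n : Int := (nums.length : Int)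
  (PySem.List.pyRange k (n - k) 1).filter (fun i =>
    (PySem.List.pyRange (i - k) (i - 1) 1).all (fun j =>
      decide (PySem.List.pyGetD nums j 0 ≥ PySem.List.pyGetD nums (j + 1) 0)) &&
    (PySem.List.pyRange (i + 1) (i + k) 1).all (fun j =>
      decide (PySem.List.pyGetD nums j 0 ≤ PySem.List.pyGetD nums (j + 1) 0)))

-- ===== PRECONDITION & SPEC =====
-- Pre_ excludes exactly k < 0, on which A always raises IndexError (lefts[i-1] or rights[i+1]
-- steps outside the tables).
def Pre_good_indices (nums : List Int) (k : Int) : Prop := 0 ≤ k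
instance (nums : List Int) (k : Int) : Decidable (Pre_good_indices nums k) := by unfold Pre_good_indices; infer_instance
def pvWitness_good_indices : List Int × Int := ([2, 1, 1, 1, 2], 2)

def Spec_good_indices (nums : List Int) (k : Int) (out : List Int) : Prop := out = good_indices_alt nums k
instance (nums : List Int) (k : Int) (out : List Int) : Decidable (Spec_good_indices nums k out) := by unfold Spec_good_indices; infer_instance

-- ===== CLAIM (what is proved, stated in full; the proofs are below) =====
def Claim_equal_good_indices : Prop := ∀ (nums : List Int) (k : Int), Dom_good_indices nums k → Pre_good_indices nums k → Spec_good_indices nums k (good_indices nums k)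
-- ===== LEMMAS AND PROOFS =====

-- run length of the non-increasing run of nums ending at position m
def La (nums : List Int) : Nat → Int
  | 0 => 1
  | m + 1 =>
    if PySem.List.pyGetD nums (m : Int) 0 ≥ PySem.List.pyGetD nums ((m : Int) + 1) 0 then
      La nums m + 1
    else 1

-- run length of the non-decreasing run of nums starting at position m, with explicit fuel
def Ra (nums : List Int) : Nat → Nat → Int
  | 0, _ => 1
  | f + 1, m =>
    if PySem.List.pyGetD nums (m : Int) 0 ≤ PySem.List.pyGetD nums ((m : Int) + 1) 0 then
      Ra nums f (m + 1) + 1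
    else 1

theorem La_pos (nums : List Int) (m : Nat) : 1 ≤ La nums m := by
  induction m with
  | zero => simp [La]
  | succ m ih => simp only [La]; split <;> omega

theorem Ra_pos (nums : List Int) (f m : Nat) : 1 ≤ Ra nums f m := by
  induction f generalizing m with
  | zero => simp [Ra]
  | succ f ih =>
    simp only [Ra]
    split
    · have := ih (m + 1); omega
    · omega

theorem La_ge_iff (nums : List Int) (k m : Nat) (hk : 1 ≤ k) (hkm : k ≤ m + 1) :
    ((k : Int) ≤ La nums m ↔ ∀ j : Nat, m + 1 - k ≤ j → j < m →
      PySem.List.pyGetD nums (j : Int) 0 ≥ PySem.List.pyGetD nums ((j : Int) + 1) 0) := by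
  induction k generalizing m with
  | zero => omega
  | succ k ih =>
    rcases Nat.eq_or_lt_of_le hk with h1 | h1
    · -- k + 1 = 1, i.e. k = 0
      have hk0 : k = 0 := by omega
      subst hk0
      have := La_pos nums m
      constructor
      · intro _ j hj1 hj2; omega
      · intro _; exact_mod_cast this
    · -- k ≥ 1
      have hk1 : 1 ≤ k := by omega
      obtain ⟨m', rfl⟩ : ∃ m', m = m' + 1 := ⟨m - 1, by omega⟩
      simp only [La]
      split
      · rename_i hc
        have hiff := ih m' hk1 (by omega)
        constructor
        · intro hle j hj1 hj2
          by_cases hjm : j = m'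
          · subst hjm; exact_mod_cast hc
          · exact (hiff.mp (by push_cast at hle ⊢; omega)) j (by omega) (by omega)
        · intro hall
          have : (k : Int) ≤ La nums m' :=
            hiff.mpr (fun j hj1 hj2 => hall j (by omega) (by omega))
          push_cast
          omega
      · rename_i hc
        constructor
        · intro hle
          exfalso; push_cast at hle; omega
        · intro hall
          exact absurd (hall m' (by omega) (by omega)) hc

theorem Ra_ge_iff (nums : List Int) (k f m : Nat) (hk : 1 ≤ k) (hkf : k ≤ f + 1) :
    ((k : Int) ≤ Ra nums f m ↔ ∀ j : Nat, m ≤ j → j < m + k - 1 →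
      PySem.List.pyGetD nums (j : Int) 0 ≤ PySem.List.pyGetD nums ((j : Int) + 1) 0) := by
  induction k generalizing f m with
  | zero => omega
  | succ k ih =>
    rcases Nat.eq_or_lt_of_le hk with h1 | h1
    · have hk0 : k = 0 := by omega
      subst hk0
      have := Ra_pos nums f m
      constructor
      · intro _ j hj1 hj2; omega
      · intro _; exact_mod_cast this
    · have hk1 : 1 ≤ k := by omega
      obtain ⟨f', rfl⟩ : ∃ f', f = f' + 1 := ⟨f - 1, by omega⟩
      simp only [Ra]
      split
      · rename_i hc
        have hiff := ih f' (m + 1) hk1 (by omega)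
        constructor
        · intro hle j hj1 hj2
          by_cases hjm : j = m
          · subst hjm; exact_mod_cast hc
          · exact (hiff.mp (by push_cast at hle ⊢; omega)) j (by omega) (by omega)
        · intro hall
          have : (k : Int) ≤ Ra nums f' (m + 1) :=
            hiff.mpr (fun j hj1 hj2 => hall j (by omega) (by omega))
          push_cast
          omega
      · rename_i hc
        constructor
        · intro hle
          exfalso; push_cast at hle; omega
        · intro hall
          exact absurd (hall m (by omega) (by omega)) hc


-- non-decreasing run length starting at j, fuel filled in
def Rr (nums : List Int) (j : Nat) : Int := Ra nums (nums.length - 1 - j) j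

-- the lefts table of port A, as a function of how much of the loop has run
def leftsFold (nums : List Int) (m : Int) : List Int :=
  (PySem.List.pyRange 1 m 1).foldl
    (fun l i =>
      if PySem.List.pyGetD nums (i - 1) 0 ≥ PySem.List.pyGetD nums i 0 then
        PySem.List.pySetD l i (PySem.List.pyGetD l (i - 1) 0 + 1)
      else l)
    (List.replicate (nums.length + 1) 1)

theorem foldl_length_pres (f : List Int → Int → List Int)
    (hf : ∀ s i, (f s i).length = s.length) :
    ∀ (xs : List Int) (s : List Int), (xs.foldl f s).length = s.length := by
  intro xs
  induction xs with
  | nil => intro s; rfl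
  | cons a as ih => intro s; simp only [List.foldl_cons]; rw [ih, hf]

theorem leftsFold_length (nums : List Int) (m : Int) :
    (leftsFold nums m).length = nums.length + 1 := by
  unfold leftsFold
  rw [foldl_length_pres]
  · simp
  · intro s i
    split
    · simp [PySem.List.length_pySetD]
    · rfl

theorem leftsFold_succ (nums : List Int) (m : Nat) (h : 1 ≤ m) :
    leftsFold nums ((m : Int) + 1) =
      (if PySem.List.pyGetD nums ((m : Int) - 1) 0 ≥ PySem.List.pyGetD nums (m : Int) 0 then
        PySem.List.pySetD (leftsFold nums (m : Int)) (m : Int)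
          (PySem.List.pyGetD (leftsFold nums (m : Int)) ((m : Int) - 1) 0 + 1)
      else leftsFold nums (m : Int)) := by
  unfold leftsFold
  rw [PySem.List.pyRange_one_succ_right (by exact_mod_cast h), List.foldl_append]
  simp

theorem lefts_getD (nums : List Int) (m : Nat) (hm : m ≤ nums.length) :
    ∀ j : Int, 0 ≤ j → j ≤ (nums.length : Int) →
      PySem.List.pyGetD (leftsFold nums (m : Int)) j 0 =
        if j < (m : Int) then La nums j.toNat else 1 := by
  induction m with
  | zero =>
    intro j hj0 hjn
    unfold leftsFold
    rw [show ((0 : Nat) : Int) = 0 by simp, PySem.List.pyRange_one_eq_nil (by omega)]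
    simp only [List.foldl_nil]
    rw [PySem.List.pyGetD_eq_getElem _ _ hj0 (by simp; omega)]
    simp only [List.getElem_replicate]
    rw [if_neg (by omega)]
  | succ m ih =>
    by_cases hm1 : m = 0
    · subst hm1
      intro j hj0 hjn
      unfold leftsFold
      rw [show ((0 + 1 : Nat) : Int) = 1 by simp, PySem.List.pyRange_one_eq_nil (by omega)]
      simp only [List.foldl_nil]
      rw [PySem.List.pyGetD_eq_getElem _ _ hj0 (by simp; omega)]
      simp only [List.getElem_replicate]
      split
      · rename_i hj1
        have : j.toNat = 0 := by omega
        rw [this]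
        rfl
      · rfl
    · have h1 : 1 ≤ m := by omega
      intro j hj0 hjn
      rw [show (((m + 1 : Nat)) : Int) = (m : Int) + 1 by push_cast; ring,
        leftsFold_succ nums m h1]
      have hlen := leftsFold_length nums (m : Int)
      have hIH := ih (by omega)
      have hval : PySem.List.pyGetD (leftsFold nums (m : Int)) ((m : Int) - 1) 0 = La nums (m - 1) := by
        rw [hIH ((m : Int) - 1) (by omega) (by omega), if_pos (by omega)]
        congr 1
        omega
      have hLa : ∀ h : (1:Int) ≤ (m:Int), La nums m =
          if PySem.List.pyGetD nums ((m : Int) - 1) 0 ≥ PySem.List.pyGetD nums (m : Int) 0 then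
            La nums (m - 1) + 1 else 1 := by
        intro _
        obtain ⟨m', rfl⟩ : ∃ m', m = m' + 1 := ⟨m - 1, by omega⟩
        simp only [La, Nat.add_sub_cancel, ge_iff_le]
        have e1 : ((m' + 1 : Nat) : Int) - 1 = (m' : Int) := by push_cast; ring
        have e2 : ((m' + 1 : Nat) : Int) = (m' : Int) + 1 := by push_cast; ring
        rw [e1, e2]
      split
      · rename_i hc
        rw [PySem.List.pySetD_natCast, hval,
          PySem.List.pyGetD_eq_getElem _ _ hj0 (by simp [hlen]; omega),
          List.getElem_set]
        by_cases hjm : j.toNat = m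
        · rw [if_pos (by omega), if_pos (by omega), hjm, hLa (by omega), if_pos hc]
        · rw [if_neg (by omega),
            show (leftsFold nums (m:Int))[j.toNat]'(by omega) =
              PySem.List.pyGetD (leftsFold nums (m:Int)) j 0 from
              (PySem.List.pyGetD_eq_getElem _ _ hj0 (by omega)).symm,
            hIH j hj0 hjn]
          by_cases hjm2 : j < (m : Int)
          · rw [if_pos hjm2, if_pos (by omega)]
          · rw [if_neg hjm2, if_neg (by omega)]
      · rename_i hc
        rw [hIH j hj0 hjn]
        by_cases hjm : j = (m : Int)
        · rw [if_neg (by omega), if_pos (by omega)]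
          have hjt : j.toNat = m := by omega
          rw [hjt, hLa (by omega), if_neg hc]
        · by_cases hjm2 : j < (m : Int)
          · rw [if_pos hjm2, if_pos (by omega)]
          · rw [if_neg hjm2, if_neg (by omega)]

theorem Rr_succ (nums : List Int) (t : Int) (h0 : 0 ≤ t) (h2 : t ≤ (nums.length : Int) - 2) :
    Rr nums t.toNat =
      if PySem.List.pyGetD nums t 0 ≤ PySem.List.pyGetD nums (t + 1) 0 then
        Rr nums (t + 1).toNat + 1
      else 1 := by
  unfold Rr
  have hf : nums.length - 1 - t.toNat = (nums.length - 2 - t.toNat) + 1 := by omega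
  rw [hf]
  simp only [Ra]
  have e1 : (t.toNat : Int) = t := by omega
  have e2 : (t + 1).toNat = t.toNat + 1 := by omega
  have e3 : nums.length - 1 - (t.toNat + 1) = nums.length - 2 - t.toNat := by omega
  rw [e1, e2, e3]

theorem rights_aux (nums : List Int) :
    ∀ (fuel : Nat) (t : Int), (t + 1).toNat = fuel → -1 ≤ t → t ≤ (nums.length : Int) - 2 →
    ∀ s : List Int, s.length = nums.length + 1 →
    (∀ j : Int, 0 ≤ j → j ≤ (nums.length : Int) →
      PySem.List.pyGetD s j 0 =
        if t < j ∧ j < (nums.length : Int) then Rr nums j.toNat else 1) →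
    ∀ j : Int, 0 ≤ j → j ≤ (nums.length : Int) →
      PySem.List.pyGetD ((PySem.List.pyRange t (-1) (-1)).foldl
        (fun r i =>
          if PySem.List.pyGetD nums i 0 ≤ PySem.List.pyGetD nums (i + 1) 0 then
            PySem.List.pySetD r i (PySem.List.pyGetD r (i + 1) 0 + 1)
          else r) s) j 0 =
        if j < (nums.length : Int) then Rr nums j.toNat else 1 := by
  intro fuel
  induction fuel with
  | zero =>
    intro t hfuel ht1 ht2 s hlen hs j hj0 hjn
    have ht : t = -1 := by omega
    subst ht
    rw [PySem.List.pyRange_neg_one_eq_nil (by omega)]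
    simp only [List.foldl_nil]
    rw [hs j hj0 hjn]
    by_cases hj : j < (nums.length : Int)
    · rw [if_pos (by omega), if_pos hj]
    · rw [if_neg (by omega), if_neg hj]
  | succ fuel ih =>
    intro t hfuel ht1 ht2 s hlen hs j hj0 hjn
    have ht0 : 0 ≤ t := by omega
    rw [PySem.List.pyRange_neg_one_cons (by omega)]
    simp only [List.foldl_cons]
    have hnext : PySem.List.pyGetD s (t + 1) 0 = Rr nums (t + 1).toNat := by
      rw [hs (t + 1) (by omega) (by omega), if_pos (by constructor <;> omega)]
    refine ih (t - 1) (by omega) (by omega) (by omega) _ ?_ ?_ j hj0 hjn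
    · -- length of the stepped state
      split
      · rw [PySem.List.length_pySetD]; exact hlen
      · exact hlen
    · -- invariant for the stepped state
      intro j' hj0' hjn'
      split
      · rename_i hc
        rw [hnext, PySem.List.pySetD_of_nonneg _ _ ht0,
          PySem.List.pyGetD_eq_getElem _ _ hj0' (by simp [hlen]; omega),
          List.getElem_set]
        by_cases hjt : j'.toNat = t.toNat
        · rw [if_pos (by omega), if_pos (by constructor <;> omega)]
          have : j'.toNat = t.toNat := hjt
          rw [this, Rr_succ nums t ht0 ht2, if_pos hc]
        · rw [if_neg (by omega),
            show s[j'.toNat]'(by omega) = PySem.List.pyGetD s j' 0 from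
              (PySem.List.pyGetD_eq_getElem _ _ hj0' (by omega)).symm,
            hs j' hj0' hjn']
          by_cases hcond : t < j' ∧ j' < (nums.length : Int)
          · rw [if_pos hcond, if_pos (by omega)]
          · rw [if_neg hcond, if_neg (by omega)]
      · rename_i hc
        rw [hs j' hj0' hjn']
        by_cases hjt : j' = t
        · rw [if_neg (by omega), if_pos (by constructor <;> omega)]
          subst hjt
          rw [Rr_succ nums j' ht0 ht2, if_neg hc]
        · by_cases hcond : t < j' ∧ j' < (nums.length : Int)
          · rw [if_pos hcond, if_pos (by omega)]
          · rw [if_neg hcond, if_neg (by omega)]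

theorem rights_getD (nums : List Int) (j : Int) (hj0 : 0 ≤ j) (hjn : j ≤ (nums.length : Int)) :
    PySem.List.pyGetD (((PySem.List.pyRange ((nums.length : Int) - 2) (-1) (-1)).foldl
      (fun r i =>
        if PySem.List.pyGetD nums i 0 ≤ PySem.List.pyGetD nums (i + 1) 0 then
          PySem.List.pySetD r i (PySem.List.pyGetD r (i + 1) 0 + 1)
        else r) (List.replicate (nums.length + 1) 1))) j 0 =
      if j < (nums.length : Int) then Rr nums j.toNat else 1 := by
  by_cases hn : nums.length = 0
  · rw [hn]
    rw [show ((0 : Nat) : Int) - 2 = -2 by norm_num, PySem.List.pyRange_neg_one_eq_nil (by omega)]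
    simp only [List.foldl_nil]
    rw [PySem.List.pyGetD_eq_getElem _ _ hj0 (by simp; omega)]
    simp only [List.getElem_replicate]
    rw [if_neg (by omega)]
  · apply rights_aux nums ((nums.length : Int) - 1).toNat ((nums.length : Int) - 2)
      (by omega) (by omega) (by omega) _ (by simp) _ j hj0 hjn
    intro j' hj0' hjn'
    rw [PySem.List.pyGetD_eq_getElem _ _ hj0' (by simp; omega)]
    simp only [List.getElem_replicate]
    by_cases hcond : (nums.length : Int) - 2 < j' ∧ j' < (nums.length : Int)
    · rw [if_pos hcond]
      have hjt : j'.toNat = nums.length - 1 := by omega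
      rw [hjt]
      unfold Rr
      have : nums.length - 1 - (nums.length - 1) = 0 := by omega
      rw [this]
      rfl
    · rw [if_neg hcond]

theorem lefts_getD' (nums : List Int) (j : Int) (hj0 : 0 ≤ j) (hjn : j ≤ (nums.length : Int)) :
    PySem.List.pyGetD (((PySem.List.pyRange 1 (nums.length : Int) 1).foldl
      (fun l i =>
        if PySem.List.pyGetD nums (i - 1) 0 ≥ PySem.List.pyGetD nums i 0 then
          PySem.List.pySetD l i (PySem.List.pyGetD l (i - 1) 0 + 1)
        else l) (List.replicate (nums.length + 1) 1))) j 0 =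
      if j < (nums.length : Int) then La nums j.toNat else 1 :=
  lefts_getD nums nums.length le_rfl j hj0 hjn

theorem getD_nonneg (s : List Int) (hs : ∀ x ∈ s, (0 : Int) ≤ x) (j : Int) :
    0 ≤ PySem.List.pyGetD s j 0 := by
  by_cases h : PySem.Raise.InRange s.length j
  · exact hs _ (PySem.List.pyGetD_mem s 0 h)
  · rw [PySem.List.pyGetD_of_none s j 0 ((PySem.List.pyGet?_eq_none_iff s j).mpr h)]

theorem entries_nonneg_A (nums : List Int) :
    ∀ (xs : List Int), (∀ i ∈ xs, 0 ≤ i) → ∀ (s : List Int), (∀ x ∈ s, (0 : Int) ≤ x) →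
      ∀ x ∈ xs.foldl
        (fun l i =>
          if PySem.List.pyGetD nums (i - 1) 0 ≥ PySem.List.pyGetD nums i 0 then
            PySem.List.pySetD l i (PySem.List.pyGetD l (i - 1) 0 + 1)
          else l) s, 0 ≤ x := by
  intro xs
  induction xs with
  | nil => intro _ s hs; simpa using hs
  | cons a as ih =>
    intro hxs s hs
    simp only [List.foldl_cons]
    apply ih (fun i hi => hxs i (List.mem_cons_of_mem a hi))
    split
    · rw [PySem.List.pySetD_of_nonneg _ _ (hxs a List.mem_cons_self)]
      intro x hx
      rcases List.mem_or_eq_of_mem_set hx with h | h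
      · exact hs x h
      · have := getD_nonneg s hs (a - 1); omega
    · exact hs

theorem entries_nonneg_B (nums : List Int) :
    ∀ (xs : List Int), (∀ i ∈ xs, 0 ≤ i) → ∀ (s : List Int), (∀ x ∈ s, (0 : Int) ≤ x) →
      ∀ x ∈ xs.foldl
        (fun r i =>
          if PySem.List.pyGetD nums i 0 ≤ PySem.List.pyGetD nums (i + 1) 0 then
            PySem.List.pySetD r i (PySem.List.pyGetD r (i + 1) 0 + 1)
          else r) s, 0 ≤ x := by
  intro xs
  induction xs with
  | nil => intro _ s hs; simpa using hs
  | cons a as ih =>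
    intro hxs s hs
    simp only [List.foldl_cons]
    apply ih (fun i hi => hxs i (List.mem_cons_of_mem a hi))
    split
    · rw [PySem.List.pySetD_of_nonneg _ _ (hxs a List.mem_cons_self)]
      intro x hx
      rcases List.mem_or_eq_of_mem_set hx with h | h
      · exact hs x h
      · have := getD_nonneg s hs (a + 1); omega
    · exact hs

theorem good_indices_spec : Claim_equal_good_indices := by
  intro nums k _ hpre
  unfold Pre_good_indices at hpre
  unfold Spec_good_indices good_indices good_indices_alt
  dsimp only
  simp only [Int.toNat_natCast]
  apply List.filter_congr
  intro i hi
  rw [PySem.List.mem_pyRange_one] at hi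
  obtain ⟨hik, hink⟩ := hi
  rcases eq_or_lt_of_le hpre with hk0 | hk1
  · -- k = 0: both windows are empty and the table entries are nonnegative
    subst hk0
    rw [PySem.List.pyRange_one_eq_nil (show i - 1 ≤ i - 0 by omega),
      PySem.List.pyRange_one_eq_nil (show i + 0 ≤ i + 1 by omega)]
    simp only [List.all_nil, Bool.and_self]
    have hA := entries_nonneg_A nums (PySem.List.pyRange 1 (nums.length : Int) 1)
      (fun x hx => by rw [PySem.List.mem_pyRange_one] at hx; omega)
      (List.replicate (nums.length + 1) 1) (by intro x hx; simp at hx; omega)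
    have hB := entries_nonneg_B nums (PySem.List.pyRange ((nums.length : Int) - 2) (-1) (-1))
      (fun x hx => by rw [PySem.List.mem_pyRange_neg_one] at hx; omega)
      (List.replicate (nums.length + 1) 1) (by intro x hx; simp at hx; omega)
    rw [decide_eq_true (by exact getD_nonneg _ hA (i - 1)),
      decide_eq_true (by exact getD_nonneg _ hB (i + 1))]
    rfl
  · -- k ≥ 1
    have hi1 : (1 : Int) ≤ i := by omega
    have hiln : i + 1 ≤ (nums.length : Int) - 1 := by omega
    have eL : PySem.List.pyGetD (((PySem.List.pyRange 1 (nums.length : Int) 1).foldl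
        (fun l i =>
          if PySem.List.pyGetD nums (i - 1) 0 ≥ PySem.List.pyGetD nums i 0 then
            PySem.List.pySetD l i (PySem.List.pyGetD l (i - 1) 0 + 1)
          else l) (List.replicate (nums.length + 1) 1))) (i - 1) 0 = La nums (i - 1).toNat := by
      rw [lefts_getD' nums (i - 1) (by omega) (by omega), if_pos (by omega)]
    have eR : PySem.List.pyGetD (((PySem.List.pyRange ((nums.length : Int) - 2) (-1) (-1)).foldl
        (fun r i =>
          if PySem.List.pyGetD nums i 0 ≤ PySem.List.pyGetD nums (i + 1) 0 then
            PySem.List.pySetD r i (PySem.List.pyGetD r (i + 1) 0 + 1)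
          else r) (List.replicate (nums.length + 1) 1))) (i + 1) 0 = Rr nums (i + 1).toNat := by
      rw [rights_getD nums (i + 1) (by omega) (by omega), if_pos (by omega)]
    simp only [ge_iff_le, eL, eR]
    have h1 : (k ≤ La nums (i - 1).toNat) ↔
        (∀ x ∈ PySem.List.pyRange (i - k) (i - 1) 1,
          PySem.List.pyGetD nums (x + 1) 0 ≤ PySem.List.pyGetD nums x 0) := by
      rw [show k = ((k.toNat : Nat) : Int) by omega,
        La_ge_iff nums k.toNat (i - 1).toNat (by omega) (by omega)]
      constructor
      · intro h x hx
        rw [PySem.List.mem_pyRange_one] at hx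
        have := h x.toNat (by omega) (by omega)
        have e : ((x.toNat : Nat) : Int) = x := by omega
        rw [e] at this
        exact this
      · intro h j hj1 hj2
        have := h (j : Int) (by rw [PySem.List.mem_pyRange_one]; omega)
        exact this
    have h2 : (k ≤ Rr nums (i + 1).toNat) ↔
        (∀ x ∈ PySem.List.pyRange (i + 1) (i + k) 1,
          PySem.List.pyGetD nums x 0 ≤ PySem.List.pyGetD nums (x + 1) 0) := by
      unfold Rr
      rw [show k = ((k.toNat : Nat) : Int) by omega,
        Ra_ge_iff nums k.toNat (nums.length - 1 - (i + 1).toNat) (i + 1).toNat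
          (by omega) (by omega)]
      constructor
      · intro h x hx
        rw [PySem.List.mem_pyRange_one] at hx
        have := h x.toNat (by omega) (by omega)
        have e : ((x.toNat : Nat) : Int) = x := by omega
        rw [e] at this
        exact this
      · intro h j hj1 hj2
        have := h (j : Int) (by rw [PySem.List.mem_pyRange_one]; omega)
        exact this
    rw [Bool.eq_iff_iff]
    simp only [Bool.and_eq_true, decide_eq_true_eq, List.all_eq_true]
    exact and_congr h1 h2
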